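-- pv_equiv track=rewrite | github.com/cooknl/AOC2020 | 17/2020-17.py | gen_search_ranges
-- ===== SOURCE A (Python) =====
-- def gen_search_ranges(state,dims):
--     coords = state.keys()
--     search_ranges = []
--     for _ in range(4):
--         search_ranges.append((0,1))
--     for c in coords:
--         for n, d in enumerate(c):
--             search_ranges[n] = ( min(search_ranges[n][0], d-1),
--                                  max(search_ranges[n][1], d+2) )
--     if dims == 3:
--         search_ranges[3] = (0,1)
--     return search_ranges
-- ===== SOURCE B (Python) =====
-- def gen_search_ranges(state, dims):
--     coords = state.keys()
--     search_ranges = []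
--     for n in range(4):
--         lo = min([0] + [c[n] - 1 for c in coords if len(c) > n])
--         hi = max([1] + [c[n] + 2 for c in coords if len(c) > n])
--         search_ranges.append((lo, hi))
--     if dims == 3:
--         search_ranges[3] = (0, 1)
--     return search_ranges
-- ===== Notes on version B (the rewrite author's own statement) =====
-- stated objective: simpler
-- what changed: Instead of one pass over all coordinates updating all four range slots in place, B computes each of the four dimensions independently as min/max over a gathered value list seeded with the (0,1) defaults.
import Mathlib
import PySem

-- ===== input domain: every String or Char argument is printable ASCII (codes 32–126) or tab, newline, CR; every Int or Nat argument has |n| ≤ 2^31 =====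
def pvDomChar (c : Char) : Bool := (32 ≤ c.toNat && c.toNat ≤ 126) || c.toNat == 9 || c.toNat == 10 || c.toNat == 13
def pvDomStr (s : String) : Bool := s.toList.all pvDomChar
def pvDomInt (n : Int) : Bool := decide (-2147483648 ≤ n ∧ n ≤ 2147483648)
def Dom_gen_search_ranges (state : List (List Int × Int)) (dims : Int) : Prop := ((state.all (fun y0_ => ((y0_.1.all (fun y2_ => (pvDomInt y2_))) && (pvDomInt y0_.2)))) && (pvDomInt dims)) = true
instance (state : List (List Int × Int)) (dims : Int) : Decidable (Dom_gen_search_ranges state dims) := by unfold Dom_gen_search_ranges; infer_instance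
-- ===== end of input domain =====

-- B computes each of the four dimension bounds independently (gather + min/max with the (0,1) seed)
-- instead of A's single in-place update pass over all coordinates: simpler decomposition, same cost.


-- ===== PORT A =====
-- inner loop 'for n, d in enumerate(c): search_ranges[n] = (min(..,d-1), max(..,d+2))';
-- the index read search_ranges[n] is total (getD) — exact on Pre_ (every coord length ≤ 4, so n < 4)
def pvLoopC : List Int → Nat → List (Int × Int) → List (Int × Int)
  | [], _, r => r
  | d :: ds, n, r =>
      pvLoopC ds (n + 1)
        (r.set n (min (r.getD n (0, 0)).1 (d - 1), max (r.getD n (0, 0)).2 (d + 2)))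

def gen_search_ranges (state : List (List Int × Int)) (dims : Int) : List (Int × Int) :=
  let coords := (PySem.Dict.ofList state).keys
  let init := (List.range 4).foldl (fun acc _ => acc ++ [((0 : Int), (1 : Int))]) []
  let r := coords.foldl (fun r c => pvLoopC c 0 r) init
  if dims == 3 then r.set 3 (0, 1) else r

-- ===== PORT B =====
def gen_search_ranges_alt (state : List (List Int × Int)) (dims : Int) : List (Int × Int) :=
  let coords := (PySem.Dict.ofList state).keys
  let ranges := (List.range 4).foldl (fun acc n =>
    acc ++ [(((PySem.List.min? ((0 : Int) ::
                  ((coords.filter (fun c => decide (n < c.length))).map (fun c => c.getD n 0 - 1)))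
                (fun x => x)).getD 0),
             ((PySem.List.max? ((1 : Int) ::
                  ((coords.filter (fun c => decide (n < c.length))).map (fun c => c.getD n 0 + 2)))
                (fun x => x)).getD 0))]) []
  if dims == 3 then ranges.set 3 (0, 1) else ranges

-- ===== PRECONDITION & SPEC =====
-- Pre_ excludes exactly the states with a coordinate tuple longer than 4, on which Python A raises IndexError.
def Pre_gen_search_ranges (state : List (List Int × Int)) (dims : Int) : Prop :=
  ∀ p ∈ state, p.1.length ≤ 4
instance (state : List (List Int × Int)) (dims : Int) : Decidable (Pre_gen_search_ranges state dims) := by unfold Pre_gen_search_ranges; infer_instance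
def pvWitness_gen_search_ranges : (List (List Int × Int)) × Int := ([([0, 2, -1], 1), ([1, 1, 1], 1)], 3)

def Spec_gen_search_ranges (state : List (List Int × Int)) (dims : Int) (out : List (Int × Int)) : Prop := out = gen_search_ranges_alt state dims
instance (state : List (List Int × Int)) (dims : Int) (out : List (Int × Int)) : Decidable (Spec_gen_search_ranges state dims out) := by unfold Spec_gen_search_ranges; infer_instance

-- ===== CLAIM (what is proved, stated in full; the proofs are below) =====
def Claim_equal_gen_search_ranges : Prop := ∀ (state : List (List Int × Int)) (dims : Int), Dom_gen_search_ranges state dims → Pre_gen_search_ranges state dims → Spec_gen_search_ranges state dims (gen_search_ranges state dims)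
-- ===== LEMMAS AND PROOFS =====

theorem pvLoopC_length (c : List Int) (k : Nat) (r : List (Int × Int)) :
    (pvLoopC c k r).length = r.length := by
  induction c generalizing k r with
  | nil => rfl
  | cons d ds ih => simp [pvLoopC, ih]

theorem pvLoopC_getElem? (c : List Int) (k : Nat) (r : List (Int × Int)) (n : Nat)
    (hn : n < r.length) :
    (pvLoopC c k r)[n]? =
      if k ≤ n ∧ n - k < c.length then
        some (min (r.getD n (0, 0)).1 (c.getD (n - k) 0 - 1),
              max (r.getD n (0, 0)).2 (c.getD (n - k) 0 + 2))
      else r[n]? := by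
  induction c generalizing k r with
  | nil => simp [pvLoopC]
  | cons d ds ih =>
    show (pvLoopC ds (k + 1) _)[n]? = _
    rw [ih (k + 1) _ (by simpa using hn)]
    by_cases hkn : n = k
    · subst hkn
      simp [List.getD_eq_getElem?_getD, hn]
    · have hset : (r.set k (min (r.getD k (0, 0)).1 (d - 1), max (r.getD k (0, 0)).2 (d + 2)))[n]? = r[n]? :=
        List.getElem?_set_ne (by omega)
      by_cases hk : k + 1 ≤ n ∧ n - (k + 1) < ds.length
      · have h1 : k ≤ n ∧ n - k < (d :: ds).length := by
          constructor; omega; simp; omega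
        have hidx : (d :: ds).getD (n - k) 0 = ds.getD (n - (k + 1)) 0 := by
          have h2 : n - k = (n - (k + 1)) + 1 := by omega
          simp [h2]
        have hgd : (r.set k (min (r.getD k (0, 0)).1 (d - 1), max (r.getD k (0, 0)).2 (d + 2))).getD n (0, 0) = r.getD n (0, 0) := by
          simp only [List.getD_eq_getElem?_getD, List.getElem?_set_ne (show k ≠ n by omega)]
        rw [if_pos hk, if_pos h1, hidx, hgd]
      · by_cases h1 : k ≤ n ∧ n - k < (d :: ds).length
        · exfalso; simp at h1 hk; omega
        · rw [if_neg hk, if_neg h1, hset]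

theorem pvFold_length (coords : List (List Int)) (r : List (Int × Int)) :
    (coords.foldl (fun r c => pvLoopC c 0 r) r).length = r.length := by
  induction coords generalizing r with
  | nil => rfl
  | cons c cs ih =>
    show (cs.foldl (fun r c => pvLoopC c 0 r) (pvLoopC c 0 r)).length = _
    rw [ih, pvLoopC_length]

theorem pvFold_getElem? (coords : List (List Int)) (r : List (Int × Int)) (n : Nat)
    (hn : n < r.length) :
    (coords.foldl (fun r c => pvLoopC c 0 r) r)[n]? =
      some ((coords.filter (fun c => decide (n < c.length))).foldl
              (fun a c => min a (c.getD n 0 - 1)) (r.getD n (0, 0)).1,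
            (coords.filter (fun c => decide (n < c.length))).foldl
              (fun a c => max a (c.getD n 0 + 2)) (r.getD n (0, 0)).2) := by
  induction coords generalizing r with
  | nil =>
    simp [List.getD_eq_getElem?_getD]
    cases h : r[n]? with
    | none => exact absurd (List.getElem?_eq_none_iff.mp h) (by omega)
    | some v => rfl
  | cons c cs ih =>
    have hlen : n < (pvLoopC c 0 r).length := by rw [pvLoopC_length]; exact hn
    show (cs.foldl (fun r c => pvLoopC c 0 r) (pvLoopC c 0 r))[n]? = _
    rw [ih _ hlen]
    have hget := pvLoopC_getElem? c 0 r n hn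
    by_cases hc : n < c.length
    · rw [if_pos ⟨Nat.zero_le n, by simpa using hc⟩] at hget
      have : (pvLoopC c 0 r).getD n (0, 0) =
          (min (r.getD n (0, 0)).1 (c.getD n 0 - 1), max (r.getD n (0, 0)).2 (c.getD n 0 + 2)) := by
        simp [List.getD_eq_getElem?_getD, hget]
      rw [this, List.filter_cons, if_pos (by simpa using hc)]
      rfl
    · rw [if_neg (by simp; omega)] at hget
      have : (pvLoopC c 0 r).getD n (0, 0) = r.getD n (0, 0) := by
        simp [List.getD_eq_getElem?_getD, hget]
      rw [this, List.filter_cons, if_neg (by simpa using hc)]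

-- A's seed list is four copies of (0,1)
theorem pvInit_eq :
    ((List.range 4).foldl (fun acc _ => acc ++ [((0 : Int), (1 : Int))]) []) =
      [(0, 1), (0, 1), (0, 1), (0, 1)] := by decide

-- B's per-dimension builder as a map over range 4
theorem pvRangesB_eq (coords : List (List Int)) :
    ((List.range 4).foldl (fun acc n =>
      acc ++ [(((PySem.List.min? ((0 : Int) ::
                    ((coords.filter (fun c => decide (n < c.length))).map (fun c => c.getD n 0 - 1)))
                  (fun x => x)).getD 0),
               ((PySem.List.max? ((1 : Int) ::
                    ((coords.filter (fun c => decide (n < c.length))).map (fun c => c.getD n 0 + 2)))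
                  (fun x => x)).getD 0))]) []) =
      (List.range 4).map (fun n =>
        ((coords.filter (fun c => decide (n < c.length))).foldl
            (fun a c => min a (c.getD n 0 - 1)) 0,
         (coords.filter (fun c => decide (n < c.length))).foldl
            (fun a c => max a (c.getD n 0 + 2)) 1)) := by
  rw [PySem.List.foldl_append_singleton_eq_map]
  refine List.map_congr_left fun n _ => ?_
  rw [PySem.List.min?_id_cons, PySem.List.max?_id_cons]
  simp [List.foldl_map]

theorem pvCore_eq (coords : List (List Int)) :
    (coords.foldl (fun r c => pvLoopC c 0 r)
        ((List.range 4).foldl (fun acc _ => acc ++ [((0 : Int), (1 : Int))]) [])) =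
      (List.range 4).map (fun n =>
        ((coords.filter (fun c => decide (n < c.length))).foldl
            (fun a c => min a (c.getD n 0 - 1)) 0,
         (coords.filter (fun c => decide (n < c.length))).foldl
            (fun a c => max a (c.getD n 0 + 2)) 1)) := by
  rw [pvInit_eq]
  apply List.ext_getElem?
  intro n
  by_cases hn : n < 4
  · rw [pvFold_getElem? _ _ n (by simpa using hn), List.getElem?_map,
        List.getElem?_range hn]
    have h01 : (([((0:Int),(1:Int)), (0, 1), (0, 1), (0, 1)] : List (Int × Int)).getD n (0, 0)) = ((0 : Int), (1 : Int)) := by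
      interval_cases n <;> rfl
    rw [h01]
    rfl
  · rw [List.getElem?_eq_none (by rw [pvFold_length]; simp; omega),
        List.getElem?_eq_none (by simp; omega)]

-- ===== VERDICT (by name: the statement is the Claim_ definition above) =====
theorem gen_search_ranges_spec : Claim_equal_gen_search_ranges := by
  intro state dims _ _
  show gen_search_ranges state dims = gen_search_ranges_alt state dims
  simp only [gen_search_ranges, gen_search_ranges_alt, pvCore_eq, pvRangesB_eq]
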